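-- pv_equiv track=rewrite | github.com/Even012/unswcode | 2023 T1/9021/week2/quiz2.py | remove_values_no_greater_than_index
-- ===== SOURCE A (Python) =====
-- def remove_values_no_greater_than_index(L):
--     # REPLACE THE PASS STATEMENT ABOVE WITH YOUR CODE
--     i = 0
--     while i<len(L):
--         if L[i] <= i:
--             L.pop(i)
--             i-=1
--         i += 1
--     return L
-- ===== SOURCE B (Python) =====
-- def remove_values_no_greater_than_index(L):
--     # Single pass: an element survives iff it is greater than the number of
--     # elements kept before it. Mutates L in place (like A) and returns it.
--     out = []
--     for x in L:
--         if x > len(out):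
--             out.append(x)
--     L[:] = out
--     return L
-- ===== Notes on version B (the rewrite author's own statement) =====
-- stated objective: faster
-- what changed: Replaced the while-loop that pops elements in place (each pop shifting the tail) with a single pass that keeps an element iff its value exceeds the count of elements kept so far.
import Mathlib
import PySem

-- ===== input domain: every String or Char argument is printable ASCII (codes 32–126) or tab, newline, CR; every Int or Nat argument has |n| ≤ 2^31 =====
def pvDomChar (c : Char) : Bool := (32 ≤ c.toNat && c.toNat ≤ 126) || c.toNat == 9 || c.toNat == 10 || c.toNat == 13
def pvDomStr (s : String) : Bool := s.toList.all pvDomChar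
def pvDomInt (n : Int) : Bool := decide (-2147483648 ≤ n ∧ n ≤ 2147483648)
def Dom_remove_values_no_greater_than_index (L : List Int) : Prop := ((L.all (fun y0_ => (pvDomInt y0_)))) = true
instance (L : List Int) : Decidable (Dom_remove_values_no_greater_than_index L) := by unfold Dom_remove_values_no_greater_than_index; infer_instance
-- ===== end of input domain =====

-- B replaces A's quadratic pop-in-place while loop by one linear pass keeping an element
-- iff it exceeds the count kept so far; equivalence is about the RETURN value (both A and B
-- also mutate the argument list in place in Python).

-- ===== PORT A =====
-- A's while loop: state is the (mutated) list and the index i; L.pop(i) = eraseIdx,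
-- then i -= 1; i += 1 leaves i unchanged. Terminates since len(L) - i decreases.
def pvLoopA (L : List Int) (i : Nat) : List Int :=
  if h : i < L.length then
    if L[i] ≤ (i : Int) then
      pvLoopA (L.eraseIdx i) i
    else
      pvLoopA L (i + 1)
  else L
termination_by L.length - i
decreasing_by
  · have := List.length_eraseIdx_of_lt h; omega
  · omega

def remove_values_no_greater_than_index (L : List Int) : List Int := pvLoopA L 0

-- ===== PORT B =====
-- B's for loop over the elements, accumulating the kept elements `out`.
def pvGoB (out : List Int) (xs : List Int) : List Int :=
  match xs with
  | [] => out
  | x :: rest => if (out.length : Int) < x then pvGoB (out ++ [x]) rest else pvGoB out rest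

def remove_values_no_greater_than_index_alt (L : List Int) : List Int := pvGoB [] L

-- ===== PRECONDITION & SPEC =====
def Spec_remove_values_no_greater_than_index (L : List Int) (out : List Int) : Prop := out = remove_values_no_greater_than_index_alt L
instance (L : List Int) (out : List Int) : Decidable (Spec_remove_values_no_greater_than_index L out) := by unfold Spec_remove_values_no_greater_than_index; infer_instance

-- ===== CLAIM (what is proved, stated in full; the proofs are below) =====
def Claim_equal_remove_values_no_greater_than_index : Prop := ∀ (L : List Int), Dom_remove_values_no_greater_than_index L → Spec_remove_values_no_greater_than_index L (remove_values_no_greater_than_index L)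

-- ===== LEMMAS AND PROOFS =====

theorem pv_eraseIdx_append (acc : List Int) (x : Int) (rest : List Int) :
    (acc ++ x :: rest).eraseIdx acc.length = acc ++ rest := by
  induction acc with
  | nil => rfl
  | cons a as ih => simpa [List.eraseIdx] using ih

theorem pv_loopA_eq_goB (rest acc : List Int) :
    pvLoopA (acc ++ rest) acc.length = pvGoB acc rest := by
  induction rest generalizing acc with
  | nil => rw [pvLoopA]; simp [pvGoB]
  | cons x rest ih =>
    rw [pvLoopA]
    have hlen : acc.length < (acc ++ x :: rest).length := by simp
    have hget : (acc ++ x :: rest)[acc.length]'hlen = x := by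
      simp
    rw [dif_pos hlen, hget]
    by_cases hx : x ≤ (acc.length : Int)
    · rw [if_pos hx, pv_eraseIdx_append, ih]
      simp [pvGoB, not_lt.mpr hx]
    · rw [if_neg hx]
      have h2 : acc.length + 1 = (acc ++ [x]).length := by simp
      have h3 : acc ++ x :: rest = (acc ++ [x]) ++ rest := by simp
      rw [h3, h2, ih]
      simp [pvGoB, lt_of_not_ge hx]

-- ===== VERDICT (by name: the statement is the Claim_ definition above) =====
theorem remove_values_no_greater_than_index_spec : Claim_equal_remove_values_no_greater_than_index := by
  intro L _
  unfold Spec_remove_values_no_greater_than_index remove_values_no_greater_than_index remove_values_no_greater_than_index_alt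
  simpa using pv_loopA_eq_goB L []
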